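-- pv_equiv track=rewrite | github.com/nanabingies/Python-Scripts | Graph Theory/Graph Theory with Python/Königsberg Bridge Problem/Königsberg.py | get_walks_starting_from
-- ===== SOURCE A (Python) =====
-- BRIDGES = [
--     "AaB",
--     "AbB",
--     "AcC",
--     "AdC",
--     "AeD",
--     "BfD",
--     "CgD",
-- ]
--
-- def get_walks_starting_from(area, bridges=BRIDGES):
--     walks = []
--
--     def make_walks(area, walked=None, bridges_crossed=None):
--         walked = walked or area
--         bridges_crossed = bridges_crossed or ()
--         # Get all of the bridges connected to `area`
--         # that haven't been crossed
--         available_bridges = [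
--             bridge
--             for bridge in bridges
--             if area in bridge and bridge not in bridges_crossed
--         ]
--
--         # Determine if the walk has ended
--         if not available_bridges:
--             walks.append(walked)
--
--         # Walk the bridge to the adjacent area and recurse
--         for bridge in available_bridges:
--             crossing = bridge[1:] if bridge[0] == area else bridge[1::-1]
--             make_walks(crossing[-1], walked + crossing, (bridge, *bridges_crossed),)
--
--     make_walks(area)
--     return walks
-- ===== SOURCE B (Python) =====
-- BRIDGES = [
--     "AaB",
--     "AbB",
--     "AcC",
--     "AdC",
--     "AeD",
--     "BfD",
--     "CgD",
-- ]
--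
-- def get_walks_starting_from(area, bridges=BRIDGES):
--     # Iterative DFS with an explicit stack of frames (area, walked, crossed).
--     walks = []
--     stack = [(area, area, ())]
--     while stack:
--         cur, walked, crossed = stack.pop()
--         available = [b for b in bridges if cur in b and b not in crossed]
--         if not available:
--             walks.append(walked)
--         # push in reverse so frames pop in the recursion's preorder
--         for b in reversed(available):
--             crossing = b[1:] if b[0] == cur else b[1::-1]
--             stack.append((crossing[-1], walked + crossing, (b, *crossed)))
--     return walks
-- ===== Notes on version B (the rewrite author's own statement) =====
-- stated objective: alternative
-- what changed: A's nested recursive closure mutating an outer 'walks' list is replaced by an iterative DFS over an explicit LIFO stack of (area, walked, crossed) frames, pushing children in reverse so walks are emitted in the same preorder.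
-- outside the precondition, e.g. on get_walks_starting_from('A', ['x', 'yx']): A returns ['A'], B returns ['A']; on get_walks_starting_from('A', ['x', 'Ax']): A raises IndexError, B raises IndexError
import Mathlib
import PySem

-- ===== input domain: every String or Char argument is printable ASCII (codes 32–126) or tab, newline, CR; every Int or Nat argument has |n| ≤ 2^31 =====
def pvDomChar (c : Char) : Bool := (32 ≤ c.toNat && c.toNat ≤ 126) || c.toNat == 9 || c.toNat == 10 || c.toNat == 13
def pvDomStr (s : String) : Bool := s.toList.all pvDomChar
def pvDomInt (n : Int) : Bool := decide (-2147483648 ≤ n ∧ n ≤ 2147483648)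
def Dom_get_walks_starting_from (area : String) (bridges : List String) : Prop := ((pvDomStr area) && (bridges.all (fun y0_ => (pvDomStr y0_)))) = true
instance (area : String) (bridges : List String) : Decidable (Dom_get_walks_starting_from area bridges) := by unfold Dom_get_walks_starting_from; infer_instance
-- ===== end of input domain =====

-- B is an iterative DFS over an explicit stack of frames instead of A's nested recursion with a
-- mutated outer list ('alternative' decomposition, same exhaustive enumeration, same output order).

-- ===== PORT A =====
-- number of bridges not yet crossed: termination measure of A's recursion
def pvUncrossed (bridges crossed : List String) : Nat :=
  (bridges.filter (fun b => !(crossed.contains b))).length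

lemma pvUncrossed_lt {bridges crossed : List String} {b : String}
    (hb : b ∈ bridges) (hnc : crossed.contains b = false) :
    pvUncrossed bridges (b :: crossed) < pvUncrossed bridges crossed := by
  unfold pvUncrossed
  have h1 : bridges.filter (fun x => !((b :: crossed).contains x))
      = (bridges.filter (fun x => !(crossed.contains x))).filter (fun x => !(b == x)) := by
    rw [List.filter_filter]
    apply List.filter_congr
    intro x _
    by_cases hx : x = b <;> simp [hx, Ne.symm]
  rw [h1]
  apply List.length_filter_lt_length_iff_exists.mpr
  refine ⟨b, List.mem_filter.mpr ⟨hb, by simpa using hnc⟩, by simp⟩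

-- A's inner 'make_walks(area, walked, bridges_crossed)'; the nonlocal list 'walks' is threaded as
-- an accumulator.  'walked = walked or area' / 'bridges_crossed or ()' are the if-normalisation /
-- identity on the values actually passed.  'bridge[1:]' / 'bridge[1::-1]' are ported by hand on the
-- char list as drop 1 / (take 2).reverse — exact for every string length; 'crossing[-1]' is
-- PySem.List.pyGetD with an arbitrary default (Python's IndexError there is excluded by Pre_).
def pvMakeWalksA (bridges : List String) (area walked : String) (crossed walks : List String) : List String :=
  let walked' := if walked = "" then area else walked
  let avail := bridges.filter (fun b => PySem.Str.isIn area b && !(crossed.contains b))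
  let walks' := if avail = [] then walks ++ [walked'] else walks
  avail.attach.foldl (fun acc p =>
    let b := p.1
    let crossing := if (PySem.Str.pyGet? b 0).map (fun c => String.ofList [c]) = some area
      then b.toList.drop 1 else (b.toList.take 2).reverse
    pvMakeWalksA bridges (String.ofList [PySem.List.pyGetD crossing (-1) ' '])
      (walked' ++ String.ofList crossing) (b :: crossed) acc) walks'
termination_by pvUncrossed bridges crossed
decreasing_by
  have hm := p.2
  simp only [avail] at hm
  simp at hm
  exact pvUncrossed_lt hm.2.1 (by simpa using hm.2.2)

def get_walks_starting_from (area : String) (bridges : List String) : List String :=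
  -- make_walks(area): walked = None → 'None or area' = area; bridges_crossed = None → ()
  pvMakeWalksA bridges area area [] []

-- ===== PORT B =====
def pvFrameWeight (bridges : List String) (crossed : List String) : Nat :=
  (bridges.length + 1) ^ (pvUncrossed bridges crossed + 1)

lemma pvChildrenWeight_lt (bridges crossed : List String) (avail : List String)
    (hlen : avail.length ≤ bridges.length)
    (hsub : ∀ b ∈ avail, b ∈ bridges ∧ crossed.contains b = false) :
    (avail.map (fun b => pvFrameWeight bridges (b :: crossed))).sum < pvFrameWeight bridges crossed := by
  have hle : ∀ x ∈ avail.map (fun b => pvFrameWeight bridges (b :: crossed)),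
      x ≤ (bridges.length + 1) ^ (pvUncrossed bridges crossed) := by
    intro x hx
    obtain ⟨b, hb, rfl⟩ := List.mem_map.mp hx
    have hlt := pvUncrossed_lt (hsub b hb).1 (hsub b hb).2
    exact Nat.pow_le_pow_right (by omega) (by unfold pvFrameWeight at *; omega)
  calc (avail.map (fun b => pvFrameWeight bridges (b :: crossed))).sum
      ≤ (avail.map (fun b => pvFrameWeight bridges (b :: crossed))).length
          * (bridges.length + 1) ^ (pvUncrossed bridges crossed) := by
        simpa using List.sum_le_card_nsmul _ _ hle
    _ < pvFrameWeight bridges crossed := by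
        unfold pvFrameWeight
        rw [List.length_map]
        have h2 : 0 < (bridges.length + 1) ^ (pvUncrossed bridges crossed) := Nat.pow_pos (by omega)
        calc avail.length * (bridges.length + 1) ^ (pvUncrossed bridges crossed)
            ≤ bridges.length * (bridges.length + 1) ^ (pvUncrossed bridges crossed) := Nat.mul_le_mul_right _ hlen
          _ < (bridges.length + 1) * (bridges.length + 1) ^ (pvUncrossed bridges crossed) := by
              exact (Nat.mul_lt_mul_right h2).mpr (by omega)
          _ = (bridges.length + 1) ^ (pvUncrossed bridges crossed + 1) := by ring

-- one stack frame per available bridge: (next area, walked so far, bridges crossed)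
def pvChildB (cur walked : String) (crossed : List String) (b : String) : String × String × List String :=
  let crossing := if (PySem.Str.pyGet? b 0).map (fun c => String.ofList [c]) = some cur
    then b.toList.drop 1 else (b.toList.take 2).reverse
  (String.ofList [PySem.List.pyGetD crossing (-1) ' '], walked ++ String.ofList crossing, b :: crossed)

@[simp] lemma pvChildB_crossed (cur walked : String) (crossed : List String) (b : String) :
    (pvChildB cur walked crossed b).2.2 = b :: crossed := rfl

-- B's 'while stack:' loop; the stack's head is its top (Python pushes reversed at the list's end,
-- so the map below lists the children in pop order)
def pvRunB (bridges : List String) (stack : List (String × String × List String)) (walks : List String) : List String :=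
  match stack with
  | [] => walks
  | (cur, walked, crossed) :: rest =>
    let avail := bridges.filter (fun b => PySem.Str.isIn cur b && !(crossed.contains b))
    if avail = [] then
      pvRunB bridges rest (walks ++ [walked])
    else
      pvRunB bridges (avail.map (pvChildB cur walked crossed) ++ rest) walks
termination_by (stack.map (fun f => pvFrameWeight bridges f.2.2)).sum
decreasing_by
  · have : 0 < pvFrameWeight bridges crossed := Nat.pow_pos (by omega)
    simp
    omega
  · simp only [List.unattach_filter, List.unattach_attach, List.map_append,
      List.sum_append, List.map_map, List.map_cons, List.sum_cons,
      Function.comp_def, pvChildB_crossed]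
    have hsub : ∀ b ∈ bridges.filter (fun b => PySem.Str.isIn cur b && !(crossed.contains b)),
        b ∈ bridges ∧ crossed.contains b = false := by
      intro b hb
      have h2 := List.mem_filter.mp hb
      refine ⟨h2.1, ?_⟩
      have h3 := h2.2; simp at h3; simpa using h3.2
    have hlt := pvChildrenWeight_lt bridges crossed
      (bridges.filter (fun b => PySem.Str.isIn cur b && !(crossed.contains b)))
      (List.length_filter_le _ _) hsub
    omega

def get_walks_starting_from_alt (area : String) (bridges : List String) : List String :=
  pvRunB bridges [(area, area, [])] []

-- ===== PRECONDITION & SPEC =====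
-- Pre_ excludes inputs with a bridge string of fewer than 2 characters that is the start area or an
-- endpoint of another bridge: walking onto such a bridge makes A (and B) raise IndexError on
-- crossing[-1]; other short bridges (never walkable) stay inside Pre_.
def Pre_get_walks_starting_from (area : String) (bridges : List String) : Prop :=
  ∀ b ∈ bridges, b.toList.length < 2 →
    b ≠ area ∧ ∀ b2 ∈ bridges, b2 ≠ b →
      b.toList ≠ b2.toList.take 1 ∧ b.toList ≠ b2.toList.reverse.take 1
instance (area : String) (bridges : List String) : Decidable (Pre_get_walks_starting_from area bridges) := by
  unfold Pre_get_walks_starting_from; infer_instance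

def pvWitness_get_walks_starting_from : String × List String :=
  ("A", ["AaB", "AbB", "AcC", "AdC", "AeD", "BfD", "CgD"])

def Spec_get_walks_starting_from (area : String) (bridges : List String) (out : List String) : Prop := out = get_walks_starting_from_alt area bridges
instance (area : String) (bridges : List String) (out : List String) : Decidable (Spec_get_walks_starting_from area bridges out) := by unfold Spec_get_walks_starting_from; infer_instance

-- ===== CLAIM (what is proved, stated in full; the proofs are below) =====
def Claim_equal_get_walks_starting_from : Prop := ∀ (area : String) (bridges : List String), Dom_get_walks_starting_from area bridges → Pre_get_walks_starting_from area bridges → Spec_get_walks_starting_from area bridges (get_walks_starting_from area bridges)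

-- ===== LEMMAS AND PROOFS =====

-- invariant of every stack frame / recursive call reachable from (area, area, []):
-- the frame's area is the start area or a one-char endpoint of an already-crossed bridge,
-- and its walked string is empty only if that area is empty
def pvGoodFrame (area : String) (bridges : List String) (f : String × String × List String) : Prop :=
  (f.1 = area ∨ ∃ b2 ∈ f.2.2, b2 ∈ bridges ∧
      (f.1.toList = b2.toList.take 1 ∨ f.1.toList = b2.toList.reverse.take 1))
  ∧ (f.2.1 = "" → f.1 = "")


lemma pvMakeWalksA_unfold (bridges : List String) (cur walked : String) (crossed walks : List String)
    (hw : walked = "" → cur = "") :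
    pvMakeWalksA bridges cur walked crossed walks =
      (if bridges.filter (fun b => PySem.Str.isIn cur b && !(crossed.contains b)) = [] then walks ++ [walked]
       else ((bridges.filter (fun b => PySem.Str.isIn cur b && !(crossed.contains b))).map
          (pvChildB cur walked crossed)).foldl
            (fun w f => pvMakeWalksA bridges f.1 f.2.1 f.2.2 w) walks) := by
  rw [pvMakeWalksA]
  have hw' : (if walked = "" then cur else walked) = walked := by
    by_cases h : walked = ""
    · rw [if_pos h, hw h, h]
    · rw [if_neg h]
  simp only [hw', List.foldl_map, pvChildB]
  split_ifs with h
  · rw [h]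
    simp
  · exact List.foldl_attach (f := fun x y =>
      pvMakeWalksA bridges
        (String.ofList [PySem.List.pyGetD
          (if Option.map (fun c => String.ofList [c]) (PySem.Str.pyGet? y 0) = some cur then
            List.drop 1 y.toList else (List.take 2 y.toList).reverse) (-1) ' '])
        (walked ++ String.ofList
          (if Option.map (fun c => String.ofList [c]) (PySem.Str.pyGet? y 0) = some cur then
            List.drop 1 y.toList else (List.take 2 y.toList).reverse))
        (y :: crossed) x)


lemma pvCrossing_nil {cur b : String}
    (hin : PySem.Str.isIn cur b = true)
    (hnil : (if (PySem.Str.pyGet? b 0).map (fun c => String.ofList [c]) = some cur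
      then b.toList.drop 1 else (b.toList.take 2).reverse) = []) :
    b = cur ∧ b.toList.length < 2 := by
  have hinf : cur.toList <:+: b.toList := (PySem.Str.isIn_iff_infix _ _).mp hin
  cases hb : b.toList with
  | nil =>
    rw [hb] at hinf
    have hc : cur.toList = [] := List.eq_nil_of_infix_nil hinf
    constructor
    · have : b.toList = cur.toList := by rw [hb, hc]
      exact String.toList_inj.mp this
    · simp
  | cons c cs =>
    have hget : (PySem.Str.pyGet? b 0).map (fun c => String.ofList [c]) = some (String.ofList [c]) := by
      have h0 : PySem.Str.pyGet? b 0 = some c := by simp [pysem, hb]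
      rw [h0]; rfl
    rw [hb] at hnil
    by_cases hcond : (PySem.Str.pyGet? b 0).map (fun c => String.ofList [c]) = some cur
    · rw [if_pos hcond] at hnil
      simp at hnil
      have hcur : cur = String.ofList [c] := by
        rw [hget] at hcond; exact (Option.some_inj.mp hcond).symm
      constructor
      · apply String.toList_inj.mp
        rw [hb, hnil, hcur]
        simp
      · simp [hnil]
    · rw [if_neg hcond] at hnil
      simp at hnil

lemma pvSingleton_getLast {l : List Char} (h : l ≠ []) : l.reverse.take 1 = [l.getLast h] := by
  rw [List.take_one, List.head?_reverse, List.getLast?_eq_some_getLast h]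
  rfl

lemma pvChildB_good {area : String} {bridges : List String} {cur walked : String} {crossed : List String}
    (hPre : Pre_get_walks_starting_from area bridges)
    (hG : pvGoodFrame area bridges (cur, walked, crossed)) {b : String}
    (hb : b ∈ bridges) (hin : PySem.Str.isIn cur b = true) (hnc : crossed.contains b = false) :
    pvGoodFrame area bridges (pvChildB cur walked crossed b) := by
  have hcr : (if (PySem.Str.pyGet? b 0).map (fun c => String.ofList [c]) = some cur
      then b.toList.drop 1 else (b.toList.take 2).reverse) ≠ [] := by
    intro h0
    obtain ⟨hbc, hshort⟩ := pvCrossing_nil hin h0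
    rcases hG.1 with hA | ⟨b2, hb2c, hb2b, hend⟩
    · exact (hPre b hb hshort).1 (hbc.trans hA)
    · by_cases hbe : b2 = b
      · rw [hbe] at hb2c
        simp at hnc
        exact hnc hb2c
      · have h2 := (hPre b hb hshort).2 b2 hb2b hbe
        have hbl : b.toList = cur.toList := by rw [hbc]
        rcases hend with he | he
        · exact h2.1 (hbl.trans he)
        · exact h2.2 (hbl.trans he)
  constructor
  · right
    refine ⟨b, by simp [pvChildB], hb, ?_⟩
    simp only [pvChildB]
    by_cases hcond : (PySem.Str.pyGet? b 0).map (fun c => String.ofList [c]) = some cur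
    · -- crossing = drop 1; its last is b's last char
      rw [if_pos hcond] at hcr ⊢
      right
      have hbnil : b.toList ≠ [] := by
        intro h0; rw [h0] at hcr; simp at hcr
      rw [PySem.List.pyGetD_neg_one _ _ hcr, List.getLast_drop hcr]
      simp [pvSingleton_getLast hbnil]
    · rw [if_neg hcond] at hcr ⊢
      left
      have hbnil : b.toList ≠ [] := by
        intro h0; rw [h0] at hcr; simp at hcr
      rw [PySem.List.pyGetD_neg_one _ _ hcr, List.getLast_reverse (by simpa using hcr)]
      rw [List.head_take (by simpa using hcr)]
      rw [List.take_one]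
      simp [List.head?_eq_some_head hbnil]
  · -- walked component nonempty
    intro h0
    exfalso
    simp only [pvChildB] at h0
    have : (walked ++ String.ofList (if (PySem.Str.pyGet? b 0).map (fun c => String.ofList [c]) = some cur
        then b.toList.drop 1 else (b.toList.take 2).reverse)).toList = [] := by rw [h0]; rfl
    rw [String.toList_append, String.toList_ofList] at this
    exact hcr (List.append_eq_nil_iff.mp this).2

lemma pvRunB_eq_foldl (area : String) (bridges : List String)
    (hPre : Pre_get_walks_starting_from area bridges) :
    ∀ (n : Nat) (stack : List (String × String × List String)) (walks : List String),
      (stack.map (fun f => pvFrameWeight bridges f.2.2)).sum ≤ n →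
      (∀ f ∈ stack, pvGoodFrame area bridges f) →
      pvRunB bridges stack walks
        = stack.foldl (fun w f => pvMakeWalksA bridges f.1 f.2.1 f.2.2 w) walks := by
  intro n
  induction n with
  | zero =>
    intro stack walks hwt hG
    cases stack with
    | nil => rw [pvRunB]; rfl
    | cons f rest =>
      exfalso
      have : 0 < pvFrameWeight bridges f.2.2 := Nat.pow_pos (by omega)
      simp at hwt
      omega
  | succ n ih =>
    intro stack walks hwt hG
    cases stack with
    | nil => rw [pvRunB]; rfl
    | cons f rest =>
      obtain ⟨cur, walked, crossed⟩ := f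
      have hGf := hG (cur, walked, crossed) List.mem_cons_self
      have hGr : ∀ f ∈ rest, pvGoodFrame area bridges f := fun f hf => hG f (List.mem_cons_of_mem _ hf)
      rw [pvRunB, List.foldl_cons, pvMakeWalksA_unfold bridges cur walked crossed walks hGf.2]
      simp only [List.map_cons, List.sum_cons] at hwt
      have hwpos : 0 < pvFrameWeight bridges crossed := Nat.pow_pos (by omega)
      by_cases hav : bridges.filter (fun b => PySem.Str.isIn cur b && !(crossed.contains b)) = []
      · rw [if_pos hav, if_pos hav]
        exact ih rest (walks ++ [walked]) (by omega) hGr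
      · rw [if_neg hav, if_neg hav]
        have hmem : ∀ b ∈ bridges.filter (fun b => PySem.Str.isIn cur b && !(crossed.contains b)),
            b ∈ bridges ∧ PySem.Str.isIn cur b = true ∧ crossed.contains b = false := by
          intro b hb
          obtain ⟨h1, h2⟩ := List.mem_filter.mp hb
          exact ⟨h1, Bool.and_elim_left h2, by simpa using Bool.and_elim_right h2⟩
        have hsum : ((bridges.filter (fun b => PySem.Str.isIn cur b && !(crossed.contains b))).map
            (fun b => pvFrameWeight bridges (b :: crossed))).sum < pvFrameWeight bridges crossed :=
          pvChildrenWeight_lt bridges crossed _ (List.length_filter_le _ _)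
            (fun b hb => ⟨(hmem b hb).1, (hmem b hb).2.2⟩)
        have hG2 : ∀ f ∈ (bridges.filter (fun b => PySem.Str.isIn cur b && !(crossed.contains b))).map
            (pvChildB cur walked crossed) ++ rest, pvGoodFrame area bridges f := by
          intro f hf
          rcases List.mem_append.mp hf with hf | hf
          · obtain ⟨b, hb, rfl⟩ := List.mem_map.mp hf
            exact pvChildB_good hPre hGf (hmem b hb).1 (hmem b hb).2.1 (hmem b hb).2.2
          · exact hGr f hf
        rw [ih _ walks (by
          simp only [List.map_append, List.sum_append, List.map_map, Function.comp_def, pvChildB_crossed]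
          omega) hG2]
        rw [List.foldl_append]


-- ===== VERDICT (by name: the statement is the Claim_ definition above) =====
theorem get_walks_starting_from_spec : Claim_equal_get_walks_starting_from := by
  intro area bridges _ hPre
  unfold Spec_get_walks_starting_from get_walks_starting_from get_walks_starting_from_alt
  have hG : ∀ f ∈ [(area, area, ([] : List String))], pvGoodFrame area bridges f := by
    intro f hf
    simp at hf
    subst hf
    exact ⟨Or.inl rfl, fun h => h⟩
  rw [pvRunB_eq_foldl area bridges hPre
    ((List.map (fun f => pvFrameWeight bridges f.2.2) [(area, area, ([] : List String))]).sum)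
    [(area, area, [])] [] le_rfl hG]
  simp
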